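-- pv_equiv track=rewrite | github.com/bluekms/PythonStudy | Programmers/Lv1 모의고사.py | solution
-- ===== SOURCE A (Python) =====
-- s1 = [1, 2, 3, 4, 5]
--
-- s2 = [2, 1, 2, 3, 2, 4, 2, 5]
--
-- s3 = [3, 3, 1, 1, 2, 2, 4, 4, 5, 5]
--
-- def solution(answers):
--     scores = {1:0, 2:0, 3:0}
--     for i in range(0, len(answers)):
--         if s1[i%len(s1)] == answers[i]:
--             scores[1] += 1
--         if s2[i%len(s2)] == answers[i]:
--             scores[2] += 1
--         if s3[i%len(s3)] == answers[i]:
--             scores[3] += 1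
--
--     list = sorted(scores.items(), key = lambda item: item[1], reverse = True)
--     max = 0
--     answer = []
--     for pair in list:
--         if max == 0:
--             max = pair[1]
--             answer.append(pair[0])
--         else:
--             if max == pair[1]:
--                 answer.append(pair[0])
--     return answer
-- ===== SOURCE B (Python) =====
-- def solution(answers):
--     # All three patterns repeat with period 40 = lcm(5, 8, 10), so bucket the
--     # answers into a histogram keyed by (index mod 40, value) in one pass, then
--     # read each pattern's score off the histogram with a fixed 40-term sum.
--     hist = {}
--     for i, a in enumerate(answers):
--         key = (i % 40, a)
--         hist[key] = hist.get(key, 0) + 1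
--     p1 = [1, 2, 3, 4, 5] * 8
--     p2 = [2, 1, 2, 3, 2, 4, 2, 5] * 5
--     p3 = [3, 3, 1, 1, 2, 2, 4, 4, 5, 5] * 4
--     scores = [sum(hist.get((r, p[r]), 0) for r in range(40)) for p in (p1, p2, p3)]
--     best = max(scores)
--     return [n for n, c in zip((1, 2, 3), scores) if c == best]
-- ===== Notes on version B (the rewrite author's own statement) =====
-- stated objective: alternative
-- what changed: B never compares answers against the three patterns element-by-element: it buckets answers once into a histogram keyed by (index mod 40, value) (40 = lcm of the pattern lengths), reads each score as a fixed 40-term sum over the histogram, and replaces A's sort-plus-stateful-max/append walk by max-then-filter over the ascending pattern order.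
import Mathlib
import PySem

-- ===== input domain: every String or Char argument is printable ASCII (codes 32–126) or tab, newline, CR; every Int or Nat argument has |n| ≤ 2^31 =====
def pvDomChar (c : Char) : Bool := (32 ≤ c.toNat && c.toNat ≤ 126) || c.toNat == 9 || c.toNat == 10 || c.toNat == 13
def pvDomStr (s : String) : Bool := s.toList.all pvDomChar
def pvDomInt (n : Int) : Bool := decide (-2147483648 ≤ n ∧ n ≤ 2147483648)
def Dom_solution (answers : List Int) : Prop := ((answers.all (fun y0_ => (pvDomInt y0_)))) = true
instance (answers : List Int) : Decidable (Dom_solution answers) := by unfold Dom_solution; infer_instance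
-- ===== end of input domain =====

-- B buckets all answers once into a (index mod 40, value) histogram (40 = lcm of the three
-- pattern lengths), reads each score as a fixed 40-term sum over that histogram, and replaces
-- A's sort-plus-stateful-max/append walk by max-then-filter (objective: alternative).

-- ===== PORT A =====
-- module constants s1, s2, s3
def pvS1 : List Int := [1, 2, 3, 4, 5]
def pvS2 : List Int := [2, 1, 2, 3, 2, 4, 2, 5]
def pvS3 : List Int := [3, 3, 1, 1, 2, 2, 4, 4, 5, 5]

-- body of A's scoring loop (i always in range, so pyGetD with default 0 is exact for answers[i];
-- scores[p] += 1 on an always-present key is insert p (getD p 0 + 1))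
def solutionStep (answers : List Int) (d : PySem.Dict Int Int) (i : Int) : PySem.Dict Int Int :=
  let d1 := if PySem.List.pyGetD pvS1 (PySem.Int.mod i (PySem.List.len pvS1)) 0 ==
               PySem.List.pyGetD answers i 0
            then d.insert 1 (d.getD 1 0 + 1) else d
  let d2 := if PySem.List.pyGetD pvS2 (PySem.Int.mod i (PySem.List.len pvS2)) 0 ==
               PySem.List.pyGetD answers i 0
            then d1.insert 2 (d1.getD 2 0 + 1) else d1
  if PySem.List.pyGetD pvS3 (PySem.Int.mod i (PySem.List.len pvS3)) 0 ==
     PySem.List.pyGetD answers i 0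
  then d2.insert 3 (d2.getD 3 0 + 1) else d2

-- A's second loop over the sorted items (state: max, answer)
def solutionTail (lst : List (Int × Int)) : List Int :=
  (lst.foldl (fun (st : Int × List Int) pair =>
      if st.1 == 0 then (pair.2, st.2 ++ [pair.1])
      else if st.1 == pair.2 then (st.1, st.2 ++ [pair.1]) else st)
    ((0 : Int), ([] : List Int))).2

def solution (answers : List Int) : List Int :=
  let scores := (PySem.List.pyRange 0 (PySem.List.len answers) 1).foldl
      (solutionStep answers) (PySem.Dict.mk [(1, 0), (2, 0), (3, 0)])
  solutionTail (PySem.List.sorted scores.items (fun item => item.2) true)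

-- ===== PORT B =====
-- hist[(i % 40, a)] = hist.get((i % 40, a), 0) + 1 over enumerate(answers)
def altHist (answers : List Int) : PySem.Dict (Int × Int) Int :=
  (PySem.List.enumerate answers).foldl
    (fun h pr =>
      let key : Int × Int := (PySem.Int.mod pr.1 40, pr.2)
      h.insert key (h.getD key 0 + 1))
    (PySem.Dict.mk [])

-- p1 = [1,2,3,4,5] * 8, etc. (Python list repetition)
def altP1 : List Int := (List.replicate 8 ([1, 2, 3, 4, 5] : List Int)).flatten
def altP2 : List Int := (List.replicate 5 ([2, 1, 2, 3, 2, 4, 2, 5] : List Int)).flatten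
def altP3 : List Int := (List.replicate 4 ([3, 3, 1, 1, 2, 2, 4, 4, 5, 5] : List Int)).flatten

-- sum(hist.get((r, p[r]), 0) for r in range(40))
def altScore (h : PySem.Dict (Int × Int) Int) (p : List Int) : Int :=
  ((PySem.List.pyRange 0 40 1).map
      (fun r => h.getD (r, PySem.List.pyGetD p r 0) 0)).sum

def solution_alt (answers : List Int) : List Int :=
  let h := altHist answers
  let scores : List Int := [altScore h altP1, altScore h altP2, altScore h altP3]
  -- best = max(scores): the running-max loop over the literal 3-list
  let best := match scores with
    | [] => 0
    | x :: t => t.foldl max x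
  ((([1, 2, 3] : List Int).zip scores).filter (fun pc => pc.2 == best)).map Prod.fst

-- ===== PRECONDITION & SPEC =====
def Spec_solution (answers : List Int) (out : List Int) : Prop := out = solution_alt answers
instance (answers : List Int) (out : List Int) : Decidable (Spec_solution answers out) := by unfold Spec_solution; infer_instance

-- ===== CLAIM (what is proved, stated in full; the proofs are below) =====
def Claim_equal_solution : Prop := ∀ (answers : List Int), Dom_solution answers → Spec_solution answers (solution answers)

-- ===== LEMMAS AND PROOFS =====

-- the per-pattern hit test, as a function of the loop index
def pvQ (answers pat : List Int) (i : Int) : Bool :=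
  PySem.List.pyGetD pat (PySem.Int.mod i (PySem.List.len pat)) 0 ==
  PySem.List.pyGetD answers i 0

-- one step of A's loop on the three-key dict
lemma step_mk (answers : List Int) (x y z i : Int) :
    solutionStep answers (PySem.Dict.mk [(1, x), (2, y), (3, z)]) i =
    PySem.Dict.mk [(1, x + if pvQ answers pvS1 i then 1 else 0),
                   (2, y + if pvQ answers pvS2 i then 1 else 0),
                   (3, z + if pvQ answers pvS3 i then 1 else 0)] := by
  simp only [solutionStep, pvQ]
  split_ifs <;>
    simp [PySem.Dict.insert, PySem.Dict.getD, PySem.Dict.get?, PySem.Dict.contains]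

-- A's whole scoring loop, as three counts
lemma loop_mk (answers : List Int) (l : List Int) (x y z : Int) :
    l.foldl (solutionStep answers) (PySem.Dict.mk [(1, x), (2, y), (3, z)]) =
    PySem.Dict.mk [(1, x + (l.countP (pvQ answers pvS1) : Int)),
                   (2, y + (l.countP (pvQ answers pvS2) : Int)),
                   (3, z + (l.countP (pvQ answers pvS3) : Int))] := by
  induction l generalizing x y z with
  | nil => simp
  | cons i l ih =>
      rw [List.foldl_cons, step_mk, ih]
      simp only [PySem.Dict.mk.injEq, List.cons.injEq, Prod.mk.injEq, List.countP_cons,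
        and_true, true_and]
      and_intros <;> split_ifs <;> push_cast <;> ring

-- B side: bumping one histogram key shifts the 40-term sum by 1 exactly when the key
-- lies on the pattern row
lemma sum_ins (d : PySem.Dict (Int × Int) Int) (f : Int → Int) (k : Int × Int)
    (R : List Int) (hR : R.Nodup) :
    (R.map (fun r => (d.insert k (d.getD k 0 + 1)).getD (r, f r) 0)).sum
    = (R.map (fun r => d.getD (r, f r) 0)).sum
      + (if k.1 ∈ R ∧ f k.1 = k.2 then 1 else 0) := by
  induction R with
  | nil => simp
  | cons r R ih =>
      have hr : r ∉ R := (List.nodup_cons.mp hR).1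
      rw [List.map_cons, List.sum_cons, List.map_cons, List.sum_cons,
        ih (List.nodup_cons.mp hR).2, PySem.Dict.getD_insert]
      by_cases h : ((r, f r) : Int × Int) = k
      · have h1 : k.1 = r := by rw [← h]
        have h2 : f k.1 = k.2 := by rw [h1, ← h]
        have hd : d.getD (r, f r) 0 = d.getD k 0 := by rw [h]
        have hnotR : ¬(k.1 ∈ R ∧ f k.1 = k.2) := fun hc => (h1 ▸ hr) hc.1
        rw [if_pos h, hd, if_neg hnotR,
          if_pos (show k.1 ∈ r :: R ∧ f k.1 = k.2 from ⟨by simp [h1], h2⟩)]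
        ring
      · rw [if_neg h]
        have hiff : (k.1 ∈ r :: R ∧ f k.1 = k.2) ↔ (k.1 ∈ R ∧ f k.1 = k.2) := by
          constructor
          · rintro ⟨hm, h2⟩
            rcases List.mem_cons.mp hm with h1 | h1
            · exact absurd (show ((r, f r) : Int × Int) = k from by
                rw [← h1, h2]) h
            · exact ⟨h1, h2⟩
          · rintro ⟨hm, h2⟩; exact ⟨List.mem_cons_of_mem _ hm, h2⟩
        rw [if_congr hiff rfl rfl]
        ring

-- the whole histogram fold, read along a pattern row, counts the hits
lemma hist_sum (f : Int → Int) (prs : List (Int × Int)) (d : PySem.Dict (Int × Int) Int) :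
    ((PySem.List.pyRange 0 40 1).map
        (fun r => (prs.foldl
            (fun h pr =>
              let key : Int × Int := (PySem.Int.mod pr.1 40, pr.2)
              h.insert key (h.getD key 0 + 1)) d).getD (r, f r) 0)).sum
    = ((PySem.List.pyRange 0 40 1).map (fun r => d.getD (r, f r) 0)).sum
      + (prs.countP (fun pr => f (PySem.Int.mod pr.1 40) == pr.2) : Int) := by
  induction prs generalizing d with
  | nil => simp
  | cons pr prs ih =>
      rw [List.foldl_cons]
      simp only []
      rw [ih, sum_ins d f (PySem.Int.mod pr.1 40, pr.2) _ (PySem.List.nodup_pyRange_one 0 40)]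
      have hmem : PySem.Int.mod pr.1 40 ∈ PySem.List.pyRange 0 40 1 := by
        rw [PySem.List.mem_pyRange_one,
          PySem.Int.mod_eq_emod_of_pos (by norm_num : (0:Int) < 40)]
        exact ⟨Int.emod_nonneg _ (by norm_num), Int.emod_lt_of_pos _ (by norm_num)⟩
      rw [List.countP_cons]
      have hb : (0:Int) ≤ pr.1 % 40 ∧ pr.1 % 40 < 40 :=
        ⟨Int.emod_nonneg _ (by norm_num), Int.emod_lt_of_pos _ (by norm_num)⟩
      by_cases hq : f (PySem.Int.mod pr.1 40) = pr.2
      · simp only [PySem.List.mem_pyRange_one,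
          PySem.Int.mod_eq_emod_of_pos (show (0:Int) < 40 by norm_num)] at hq ⊢
        simp [hq, hb]
        ring
      · simp only [PySem.List.mem_pyRange_one,
          PySem.Int.mod_eq_emod_of_pos (show (0:Int) < 40 by norm_num)] at hq ⊢
        simp [hq]

-- periodicity: each pattern row of the length-40 table agrees with the cyclic pattern
lemma per_pat (pat p40 : List Int) (hdvd : (PySem.List.len pat) ∣ 40)
    (hpos : 0 < PySem.List.len pat)
    (hrow : ∀ r : Int, 0 ≤ r → r < 40 →
        PySem.List.pyGetD p40 r 0 = PySem.List.pyGetD pat (r % PySem.List.len pat) 0)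
    (i : Int) :
    PySem.List.pyGetD p40 (PySem.Int.mod i 40) 0 =
    PySem.List.pyGetD pat (PySem.Int.mod i (PySem.List.len pat)) 0 := by
  rw [PySem.Int.mod_eq_emod_of_pos (by norm_num : (0:Int) < 40),
    PySem.Int.mod_eq_emod_of_pos hpos, ← Int.emod_emod_of_dvd i hdvd]
  exact hrow _ (Int.emod_nonneg _ (by norm_num)) (Int.emod_lt_of_pos _ (by norm_num))

-- B's score over the histogram = A's per-pattern count
lemma alt_score_eq (answers pat p40 : List Int) (hdvd : (PySem.List.len pat) ∣ 40)
    (hpos : 0 < PySem.List.len pat)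
    (hrow : ∀ r : Int, 0 ≤ r → r < 40 →
        PySem.List.pyGetD p40 r 0 = PySem.List.pyGetD pat (r % PySem.List.len pat) 0) :
    altScore (altHist answers) p40 =
    (((PySem.List.pyRange 0 (PySem.List.len answers) 1).countP (pvQ answers pat) : Nat) : Int) := by
  unfold altScore altHist
  rw [hist_sum (fun r => PySem.List.pyGetD p40 r 0) (PySem.List.enumerate answers)
    (PySem.Dict.mk [])]
  have hz : ((PySem.List.pyRange 0 40 1).map
      (fun r => (PySem.Dict.mk ([] : List ((Int × Int) × Int))).getD
        (r, PySem.List.pyGetD p40 r 0) 0)).sum = 0 := by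
    simp [PySem.Dict.getD, PySem.Dict.get?]
  rw [hz, zero_add, PySem.List.enumerate_eq_map_pyRange answers 0, List.countP_map]
  congr 1
  apply List.countP_congr
  intro i _
  simp only [Function.comp_apply]
  rw [per_pat pat p40 hdvd hpos hrow i]
  rfl

-- A's tail loop on the sorted three items = max-then-filter, for nonnegative scores
lemma tail_eq (a b c : Int) (ha : 0 ≤ a) (hb : 0 ≤ b) (hc : 0 ≤ c) :
    solutionTail (PySem.List.sorted [(1, a), (2, b), (3, c)] (fun item => item.2) true) =
    (([(1, a), (2, b), (3, c)] : List (Int × Int)).filter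
        (fun pc => pc.2 == max (max a b) c)).map Prod.fst := by
  rw [PySem.List.sorted_rev_eq_foldl_insertBy]
  simp only [List.foldl_cons, List.foldl_nil]
  by_cases hab : a < b
  · by_cases hbc : b < c
    · -- a < b < c : sorted [(3,c),(2,b),(1,a)], best = c
      have hM : max (max a b) c = c := by omega
      simp only [hM]
      simp [PySem.List.insertBy, hab, hbc, solutionTail, List.filter,
        (show ¬c = 0 by omega),
        (show ¬c = b by omega),
        (show ¬c = a by omega),
        beq_eq_false_iff_ne.mpr (show a ≠ c by omega),
        beq_eq_false_iff_ne.mpr (show b ≠ c by omega)]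
    · by_cases hac : a < c
      · -- a < c ≤ b : sorted [(2,b),(3,c),(1,a)], best = b
        have hM : max (max a b) c = b := by omega
        simp only [hM]
        by_cases hE : b = c
        · subst hE
          simp [PySem.List.insertBy, hab, solutionTail, List.filter,
            (show ¬b = 0 by omega),
            (show ¬b = a by omega),
            beq_eq_false_iff_ne.mpr (show a ≠ b by omega)]
        · simp [PySem.List.insertBy, hab, hbc, hac, solutionTail, List.filter,
            (show ¬b = 0 by omega),
            (show ¬b = a by omega), beq_eq_false_iff_ne.mpr (show a ≠ b by omega),
            (show ¬b = c from hE),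
            beq_eq_false_iff_ne.mpr (show c ≠ b from fun h => hE h.symm)]
      · -- c ≤ a < b : sorted [(2,b),(1,a),(3,c)], best = b
        have hM : max (max a b) c = b := by omega
        simp only [hM]
        simp [PySem.List.insertBy, hab, hbc, hac, solutionTail, List.filter,
          (show ¬b = 0 by omega),
          (show ¬b = a by omega),
          beq_eq_false_iff_ne.mpr (show a ≠ b by omega),
          (show ¬b = c by omega),
          (show ¬c = b by omega), beq_eq_false_iff_ne.mpr (show c ≠ b by omega)]
  · by_cases hac : a < c
    · -- b ≤ a < c : sorted [(3,c),(1,a),(2,b)], best = c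
      have hM : max (max a b) c = c := by omega
      simp only [hM]
      simp [PySem.List.insertBy, hab, hac, solutionTail, List.filter,
        (show ¬c = 0 by omega), beq_eq_false_iff_ne.mpr (show c ≠ 0 by omega),
        (show ¬c = a by omega), beq_eq_false_iff_ne.mpr (show c ≠ a by omega),
        (show ¬c = b by omega), beq_eq_false_iff_ne.mpr (show c ≠ b by omega),
        (show ¬a = c by omega), beq_eq_false_iff_ne.mpr (show a ≠ c by omega),
        (show ¬b = c by omega), beq_eq_false_iff_ne.mpr (show b ≠ c by omega)]
    · by_cases hbc : b < c
      · -- b < c ≤ a : sorted [(1,a),(3,c),(2,b)], best = a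
        have hM : max (max a b) c = a := by omega
        simp only [hM]
        by_cases hE : a = c
        · subst hE
          simp [PySem.List.insertBy, hab, hac, hbc, solutionTail, List.filter,
            (show ¬a = 0 by omega), beq_eq_false_iff_ne.mpr (show a ≠ 0 by omega),
            (show ¬a = b by omega), beq_eq_false_iff_ne.mpr (show a ≠ b by omega),
            (show ¬b = a by omega), beq_eq_false_iff_ne.mpr (show b ≠ a by omega)]
        · simp [PySem.List.insertBy, hab, hac, hbc, solutionTail, List.filter,
            (show ¬a = 0 by omega), beq_eq_false_iff_ne.mpr (show a ≠ 0 by omega),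
            (show ¬a = b by omega), beq_eq_false_iff_ne.mpr (show a ≠ b by omega),
            (show ¬b = a by omega), beq_eq_false_iff_ne.mpr (show b ≠ a by omega),
            (show ¬a = c from hE), beq_eq_false_iff_ne.mpr (show a ≠ c from hE),
            (show ¬c = a from fun h => hE h.symm), beq_eq_false_iff_ne.mpr (show c ≠ a from fun h => hE h.symm)]
      · -- c ≤ b ≤ a : sorted [(1,a),(2,b),(3,c)], best = a
        have hM : max (max a b) c = a := by omega
        simp only [hM]
        by_cases h0 : a = 0
        · have hb0 : b = 0 := by omega
          have hc0 : c = 0 := by omega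
          subst h0; subst hb0; subst hc0
          simp [PySem.List.insertBy, solutionTail, List.filter]
        · by_cases hE : a = b
          · by_cases hE2 : a = c
            · subst hE; subst hE2
              simp_all [PySem.List.insertBy, solutionTail, List.filter]
            · subst hE
              simp [PySem.List.insertBy, hab, hac, hbc, solutionTail, List.filter,
                (show ¬a = 0 from h0), beq_eq_false_iff_ne.mpr (show a ≠ 0 from h0),
                (show ¬a = c from hE2), beq_eq_false_iff_ne.mpr (show a ≠ c from hE2),
                (show ¬c = a from fun h => hE2 h.symm),
                beq_eq_false_iff_ne.mpr (show c ≠ a from fun h => hE2 h.symm)]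
          · simp [PySem.List.insertBy, hab, hac, hbc, solutionTail, List.filter,
              (show ¬a = 0 from h0), beq_eq_false_iff_ne.mpr (show a ≠ 0 from h0),
              (show ¬a = b from hE), beq_eq_false_iff_ne.mpr (show a ≠ b from hE),
              (show ¬b = a from fun h => hE h.symm), beq_eq_false_iff_ne.mpr (show b ≠ a from fun h => hE h.symm),
              (show ¬a = c by omega), beq_eq_false_iff_ne.mpr (show a ≠ c by omega),
              (show ¬c = a by omega), beq_eq_false_iff_ne.mpr (show c ≠ a by omega)]

-- ===== VERDICT (by name: the statement is the Claim_ definition above) =====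
theorem solution_spec : Claim_equal_solution := by
  intro answers _
  simp only [Spec_solution, solution, solution_alt]
  rw [loop_mk]
  rw [alt_score_eq answers pvS1 altP1 (by decide) (by decide)
       (fun r h1 h2 => by interval_cases r <;> decide),
     alt_score_eq answers pvS2 altP2 (by decide) (by decide)
       (fun r h1 h2 => by interval_cases r <;> decide),
     alt_score_eq answers pvS3 altP3 (by decide) (by decide)
       (fun r h1 h2 => by interval_cases r <;> decide)]
  simp only [zero_add, List.zip, List.zipWith, List.foldl]
  exact tail_eq _ _ _ (Int.natCast_nonneg _) (Int.natCast_nonneg _) (Int.natCast_nonneg _)
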